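-- pv_equiv track=rewrite | github.com/Galilevin1/Distress_Microbiome_Analyzing | Models_Analyses.py | return_leaf_names
-- ===== SOURCE A (Python) =====
-- def return_leaf_names(bacteria_names):
--
--     # Identify non-leaf taxa (those that are prefixes of longer taxa)
--     non_leaf_taxa = set()
--     for name in bacteria_names:
--         parts = name.split(";")
--         for i in range(1, len(parts)):
--             parent = ";".join(parts[:i])
--             non_leaf_taxa.add(parent)
--
--     # Filter out non-leaf names (i.e. keep only real leaves)
--     leaf_names = [name for name in bacteria_names if name not in non_leaf_taxa]
--
--     return leaf_names
-- ===== SOURCE B (Python) =====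
-- def return_leaf_names(bacteria_names):
--     # A name is a leaf unless some name in the list extends it past a ';' boundary.
--     return [n for n in bacteria_names
--             if not any(m.startswith(n + ";") for m in bacteria_names)]
-- ===== Notes on version B (the rewrite author's own statement) =====
-- stated objective: simpler
-- what changed: Instead of precomputing the set of all ';'-joined proper prefixes of every name, B keeps a name iff no name in the list starts with it followed by ';', as one nested scan with no table.
import Mathlib
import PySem

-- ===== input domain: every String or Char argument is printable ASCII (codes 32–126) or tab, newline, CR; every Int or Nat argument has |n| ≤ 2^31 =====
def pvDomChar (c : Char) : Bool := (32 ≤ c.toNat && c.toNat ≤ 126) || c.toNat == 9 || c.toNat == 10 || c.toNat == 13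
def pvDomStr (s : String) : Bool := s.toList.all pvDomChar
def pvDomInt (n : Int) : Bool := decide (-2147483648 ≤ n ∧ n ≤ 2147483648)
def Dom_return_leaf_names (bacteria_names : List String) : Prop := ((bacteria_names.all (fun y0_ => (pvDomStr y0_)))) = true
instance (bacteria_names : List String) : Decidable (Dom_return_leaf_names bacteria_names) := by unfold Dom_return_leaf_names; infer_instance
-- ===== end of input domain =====

-- B replaces A's precomputed set of all ';'-joined proper prefixes by a direct nested
-- scan: keep a name iff no name in the list starts with it followed by ';' (simpler, no table).

-- ===== PORT A =====
def return_leaf_names (bacteria_names : List String) : List String :=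
  let non_leaf_taxa : PySem.Set String :=
    bacteria_names.foldl (fun s name =>
      -- name.split(";") : the separator ";" is nonempty, so split? always returns some
      let parts : List String := (PySem.Str.split? name ";").getD []
      (PySem.List.pyRange 1 (parts.length : Int)).foldl (fun s i =>
        PySem.Set.add s (PySem.Str.join ";" (PySem.List.slice parts none (some i)))) s)
      PySem.Set.empty
  bacteria_names.filter (fun name => !(PySem.Set.contains non_leaf_taxa name))

-- ===== PORT B =====
def return_leaf_names_alt (bacteria_names : List String) : List String :=
  bacteria_names.filter (fun n =>
    !(bacteria_names.any (fun m => PySem.Str.startswith m (n ++ ";"))))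

-- ===== PRECONDITION & SPEC =====
def Spec_return_leaf_names (bacteria_names : List String) (out : List String) : Prop := out = return_leaf_names_alt bacteria_names
instance (bacteria_names : List String) (out : List String) : Decidable (Spec_return_leaf_names bacteria_names out) := by unfold Spec_return_leaf_names; infer_instance

-- ===== CLAIM (what is proved, stated in full; the proofs are below) =====
def Claim_equal_return_leaf_names : Prop := ∀ (bacteria_names : List String), Dom_return_leaf_names bacteria_names → Spec_return_leaf_names bacteria_names (return_leaf_names bacteria_names)

-- ===== LEMMAS AND PROOFS =====

-- A simple structural single-character splitter, used as a reference point for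
-- PySem.Chars.splitOn with a one-character separator.
def mySplit (c : Char) : List Char → List (List Char)
  | [] => [[]]
  | a :: rest =>
    if a = c then [] :: mySplit c rest
    else
      match mySplit c rest with
      | [] => [[a]]
      | p :: ps => (a :: p) :: ps

theorem mySplit_pos (c : Char) (l : List Char) : mySplit c (c :: l) = [] :: mySplit c l := by
  simp [mySplit]

theorem mySplit_neg (c a : Char) (h : ¬ a = c) (l p : List Char) (ps : List (List Char))
    (hms : mySplit c l = p :: ps) : mySplit c (a :: l) = (a :: p) :: ps := by
  simp [mySplit, h, hms]

theorem mySplit_ne_nil (c : Char) (l : List Char) : mySplit c l ≠ [] := by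
  induction l with
  | nil => simp [mySplit]
  | cons a rest ih =>
    simp only [mySplit]
    split
    · simp
    · cases h : mySplit c rest <;> simp

theorem splitOn_go_eq (c : Char) (fuel : Nat) :
    ∀ (l cur : List Char) (acc : List (List Char)), l.length < fuel →
      PySem.Chars.splitOn.go [c] fuel l cur acc =
        acc.reverse ++ (mySplit c l).modifyHead (cur.reverse ++ ·) := by
  induction fuel with
  | zero => intro l cur acc h; omega
  | succ fuel ih =>
    intro l cur acc h
    cases l with
    | nil =>
      simp [PySem.Chars.splitOn.go, mySplit]
    | cons a rest =>
      by_cases hac : a = c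
      · subst hac
        have hpre : [a].isPrefixOf (a :: rest) = true := by simp [List.isPrefixOf]
        rw [PySem.Chars.splitOn.go, if_pos hpre]
        have := ih rest [] (cur.reverse :: acc) (by simpa using Nat.lt_of_succ_lt_succ h)
        simp only [List.length_cons, List.length_nil, List.drop_succ_cons, List.drop_zero] at this ⊢
        rw [this, mySplit_pos]
        cases mySplit a rest <;> simp
      · rw [PySem.Chars.splitOn.go,
          if_neg (by simp [List.isPrefixOf]; exact fun hh => hac hh.symm)]
        have := ih rest (a :: cur) acc (by simpa using Nat.lt_of_succ_lt_succ h)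
        rw [this]
        cases hms : mySplit c rest with
        | nil => exact absurd hms (mySplit_ne_nil c rest)
        | cons p ps =>
          rw [mySplit_neg c a hac rest p ps hms]
          simp

theorem splitOn_eq_mySplit (c : Char) (l : List Char) :
    PySem.Chars.splitOn l [c] = mySplit c l := by
  unfold PySem.Chars.splitOn
  rw [splitOn_go_eq c (l.length + 1) l [] [] (by omega)]
  cases h : mySplit c l with
  | nil => exact absurd h (mySplit_ne_nil c l)
  | cons p ps => simp

theorem join_cons_head (s : List Char) (x p : List Char) (ps : List (List Char)) :
    PySem.Chars.join s ((x ++ p) :: ps) = x ++ PySem.Chars.join s (p :: ps) := by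
  cases ps with
  | nil => simp [PySem.Chars.join, List.intercalate]
  | cons q qs =>
    rw [PySem.Chars.join_cons_cons, PySem.Chars.join_cons_cons]
    simp

theorem join_mySplit (c : Char) (l : List Char) :
    PySem.Chars.join [c] (mySplit c l) = l := by
  induction l with
  | nil => simp [mySplit, PySem.Chars.join, List.intercalate]
  | cons a rest ih =>
    by_cases hac : a = c
    · subst hac
      rw [mySplit_pos]
      cases hms : mySplit a rest with
      | nil => exact absurd hms (mySplit_ne_nil a rest)
      | cons p ps =>
        rw [PySem.Chars.join_cons_cons]
        rw [hms] at ih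
        simp [ih]
    · cases hms : mySplit c rest with
      | nil => exact absurd hms (mySplit_ne_nil c rest)
      | cons p ps =>
        rw [mySplit_neg c a hac rest p ps hms,
          show (a :: p) = [a] ++ p from rfl, join_cons_head]
        rw [hms] at ih
        simp [ih]

theorem mySplit_append (c : Char) (a b : List Char) :
    mySplit c (a ++ c :: b) = mySplit c a ++ mySplit c b := by
  induction a with
  | nil => simp [mySplit]
  | cons x a' ih =>
    by_cases hxc : x = c
    · subst hxc
      rw [List.cons_append, mySplit_pos, mySplit_pos, ih, List.cons_append]
    · cases h : mySplit c a' with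
      | nil => exact absurd h (mySplit_ne_nil c a')
      | cons p ps =>
        have h2 : mySplit c (a' ++ c :: b) = (p :: ps) ++ mySplit c b := by
          rw [ih, h]
        cases hmb : mySplit c b with
        | nil => exact absurd hmb (mySplit_ne_nil c b)
        | cons q qs =>
          rw [List.cons_append,
            mySplit_neg c x hxc (a' ++ c :: b) p (ps ++ q :: qs) (by rw [h2, hmb]; simp),
            mySplit_neg c x hxc a' p ps h]
          simp

theorem join_append_nonempty (s : List Char) (xs ys : List (List Char))
    (hx : xs ≠ []) (hy : ys ≠ []) :
    PySem.Chars.join s (xs ++ ys) = PySem.Chars.join s xs ++ s ++ PySem.Chars.join s ys := by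
  induction xs with
  | nil => exact absurd rfl hx
  | cons p xs' ih =>
    cases xs' with
    | nil =>
      cases ys with
      | nil => exact absurd rfl hy
      | cons q qs =>
        rw [List.singleton_append, PySem.Chars.join_cons_cons]
        simp [PySem.Chars.join, List.intercalate]
    | cons p2 xs'' =>
      have e1 : (p :: p2 :: xs'') ++ ys = p :: ((p2 :: xs'') ++ ys) := by simp
      have e2 : (p2 :: xs'') ++ ys = p2 :: (xs'' ++ ys) := by simp
      rw [e1, e2, PySem.Chars.join_cons_cons, ← e2, ih (by simp),
        PySem.Chars.join_cons_cons]
      simp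

-- The crux: a ';'-joined proper prefix of cs is exactly a string ns with ns ++ [c] a prefix of cs.
theorem key_chars (c : Char) (cs ns : List Char) :
    (∃ k : Nat, 1 ≤ k ∧ k < (mySplit c cs).length ∧
      PySem.Chars.join [c] ((mySplit c cs).take k) = ns) ↔ (ns ++ [c]) <+: cs := by
  constructor
  · rintro ⟨k, hk1, hk2, hjoin⟩
    have hsplit : mySplit c cs = (mySplit c cs).take k ++ (mySplit c cs).drop k :=
      (List.take_append_drop k _).symm
    have htak : (mySplit c cs).take k ≠ [] := by
      intro h
      rcases List.take_eq_nil_iff.mp h with h0 | h0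
      · omega
      · exact mySplit_ne_nil c cs h0
    have hdrp : (mySplit c cs).drop k ≠ [] := by
      intro h
      have := List.drop_eq_nil_iff.mp h
      omega
    have hj := join_mySplit c cs
    rw [hsplit, join_append_nonempty [c] _ _ htak hdrp, hjoin] at hj
    exact ⟨PySem.Chars.join [c] ((mySplit c cs).drop k), hj⟩
  · rintro ⟨rest, hrest⟩
    have hcs : cs = ns ++ c :: rest := by
      rw [← hrest]; simp
    refine ⟨(mySplit c ns).length, ?_, ?_, ?_⟩
    · cases h : mySplit c ns with
      | nil => exact absurd h (mySplit_ne_nil c ns)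
      | cons p ps => simp
    · rw [hcs, mySplit_append]
      have : mySplit c rest ≠ [] := mySplit_ne_nil c rest
      cases h : mySplit c rest with
      | nil => exact absurd h this
      | cons p ps => simp
    · rw [hcs, mySplit_append, List.take_left]
      exact join_mySplit c ns

-- membership in A's accumulated set
theorem mem_nonLeaf (l : List String) (s0 : PySem.Set String) (y : String) :
    y ∈ l.foldl (fun s name =>
      let parts : List String := (PySem.Str.split? name ";").getD []
      (PySem.List.pyRange 1 (parts.length : Int)).foldl (fun s i =>
        PySem.Set.add s (PySem.Str.join ";" (PySem.List.slice parts none (some i)))) s) s0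
    ↔ y ∈ s0 ∨ ∃ m ∈ l, ∃ i ∈ PySem.List.pyRange 1 ((((PySem.Str.split? m ";").getD []).length : Int)),
        y = PySem.Str.join ";" (PySem.List.slice ((PySem.Str.split? m ";").getD []) none (some i)) := by
  induction l generalizing s0 with
  | nil => simp
  | cons m l ih =>
    rw [List.foldl_cons, ih]
    rw [PySem.Set.mem_foldl_add]
    simp only [List.mem_cons]
    constructor
    · rintro (⟨h | ⟨i, hi, hy⟩⟩ | ⟨m', hm', h⟩)
      · exact Or.inl h
      · exact Or.inr ⟨m, Or.inl rfl, i, hi, hy⟩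
      · exact Or.inr ⟨m', Or.inr hm', h⟩
    · rintro (h | ⟨m', hm' | hm', h⟩)
      · exact Or.inl (Or.inl h)
      · subst hm'; exact Or.inl (Or.inr h)
      · exact Or.inr ⟨m', hm', h⟩

theorem parts_eq (m : String) :
    (PySem.Str.split? m ";").getD [] =
      (PySem.Chars.splitOn m.toList [';']).map String.ofList := by
  simp [PySem.Str.split?, PySem.Chars.split?]

theorem toList_comp_ofList : (String.toList ∘ String.ofList) = id := by
  funext l
  simp

-- the pointwise equivalence of the two keep-conditions
theorem keep_iff (l : List String) (n : String) :
    ((PySem.Set.contains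
      (l.foldl (fun s name =>
        let parts : List String := (PySem.Str.split? name ";").getD []
        (PySem.List.pyRange 1 (parts.length : Int)).foldl (fun s i =>
          PySem.Set.add s (PySem.Str.join ";" (PySem.List.slice parts none (some i)))) s)
        PySem.Set.empty) n) = true)
    ↔ (l.any (fun m => PySem.Str.startswith m (n ++ ";")) = true) := by
  rw [PySem.Set.contains_iff, mem_nonLeaf, List.any_eq_true]
  constructor
  · rintro (h | ⟨m, hm, i, hi, hy⟩)
    · exact absurd h (by simp [PySem.Set.empty])
    · refine ⟨m, hm, ?_⟩
      rw [PySem.List.mem_pyRange_one] at hi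
      obtain ⟨hi1, hi2⟩ := hi
      have hknat : i = ((i.toNat : Nat) : Int) := by omega
      rw [hknat, PySem.List.slice_to_natCast] at hy
      rw [parts_eq] at hy hi2
      set ps := PySem.Chars.splitOn m.toList [';'] with hps
      rw [PySem.Str.startswith_eq, PySem.Chars.startswith]
      rw [List.isPrefixOf_iff_prefix]
      have hjoin : PySem.Chars.join [';'] ((mySplit ';' m.toList).take i.toNat) = n.toList := by
        rw [← splitOn_eq_mySplit, ← hps]
        have : n.toList = (PySem.Str.join ";" ((ps.map String.ofList).take i.toNat)).toList := by
          rw [← hy]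
        rw [this, PySem.Str.toList_join, ← List.map_take]
        simp only [PySem.Chars.join, List.map_map, toList_comp_ofList, List.map_id]
        rw [show ";".toList = [';'] by decide]
      have hlen : i.toNat < (mySplit ';' m.toList).length := by
        rw [← splitOn_eq_mySplit, ← hps]
        simp only [List.length_map] at hi2
        omega
      have := (key_chars ';' m.toList n.toList).mp
        ⟨i.toNat, by omega, hlen, hjoin⟩
      have h2 : (n ++ ";").toList = n.toList ++ [';'] := by simp
      rw [h2]
      exact this
  · rintro ⟨m, hm, hsw⟩
    right
    rw [PySem.Str.startswith_eq, PySem.Chars.startswith, List.isPrefixOf_iff_prefix] at hsw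
    have h2 : (n ++ ";").toList = n.toList ++ [';'] := by simp
    rw [h2] at hsw
    obtain ⟨k, hk1, hk2, hjoin⟩ := (key_chars ';' m.toList n.toList).mpr hsw
    refine ⟨m, hm, (k : Int), ?_, ?_⟩
    · rw [PySem.List.mem_pyRange_one, parts_eq]
      rw [← splitOn_eq_mySplit ';'] at hk2
      simp only [List.length_map]
      omega
    · rw [PySem.List.slice_to_natCast, parts_eq]
      apply String.toList_inj.mp
      rw [PySem.Str.toList_join, ← List.map_take]
      rw [← hjoin, ← splitOn_eq_mySplit ';']
      simp only [PySem.Chars.join, List.map_map, toList_comp_ofList, List.map_id]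
      rw [show ";".toList = [';'] by decide]

-- ===== VERDICT (by name: the statement is the Claim_ definition above) =====
theorem return_leaf_names_spec : Claim_equal_return_leaf_names := by
  intro l _
  unfold Spec_return_leaf_names return_leaf_names return_leaf_names_alt
  apply List.filter_congr
  intro n _
  rw [Bool.eq_iff_iff.mpr (keep_iff l n)]
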